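-- pv_equiv track=rewrite | github.com/ismaelneto49/1-computer-science | prog1/miniteste7/cobrinha/cobrinha.py | cobrinha
-- ===== SOURCE A (Python) =====
-- def cobrinha(matriz):
--     snake = []
--     change = False
--     for l in range(len(matriz)):
--         if not change:
--             change = True
--             for c in range(len(matriz[l])):
--                 e = matriz[l][c]
--                 if e % 2 != 0:
--                     snake.append(e)
--         else:
--             change = False
--             for c in range(len(matriz[l]) - 1, -1, -1):
--                 e = matriz[l][c]
--                 if e % 2 != 0:
--                     snake.append(e)
--     return snake
-- ===== SOURCE B (Python) =====
-- def cobrinha(matriz):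
--     # Recursive, two rows per step: filter the odds of each row first, then
--     # reverse the second row's odds (filter and reverse commute), no direction flag.
--     if not matriz:
--         return []
--     impares = [e for e in matriz[0] if e % 2 != 0]
--     if len(matriz) == 1:
--         return impares
--     volta = [e for e in matriz[1] if e % 2 != 0]
--     volta.reverse()
--     return impares + volta + cobrinha(matriz[2:])
-- ===== Notes on version B (the rewrite author's own statement) =====
-- stated objective: alternative
-- what changed: B is a direct recursion consuming two rows per step (forward row, then backward row, then recurse on matriz[2:]), filtering each row's odds first and reversing the filtered odds of the second row; A is one iterative loop with a toggled direction flag and a manual backward index loop that filters inline.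
import Mathlib
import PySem

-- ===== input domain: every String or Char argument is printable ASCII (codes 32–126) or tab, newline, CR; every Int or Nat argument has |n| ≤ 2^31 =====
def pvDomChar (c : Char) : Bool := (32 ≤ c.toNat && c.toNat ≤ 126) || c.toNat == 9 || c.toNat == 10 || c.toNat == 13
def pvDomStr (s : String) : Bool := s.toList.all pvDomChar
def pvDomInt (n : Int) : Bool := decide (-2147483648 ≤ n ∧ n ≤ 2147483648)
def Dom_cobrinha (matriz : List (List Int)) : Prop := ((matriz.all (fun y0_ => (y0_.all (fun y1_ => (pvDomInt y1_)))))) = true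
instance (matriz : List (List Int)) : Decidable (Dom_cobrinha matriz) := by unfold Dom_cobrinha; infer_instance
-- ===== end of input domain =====

-- B recurses two rows at a time (filter odds, reverse the second row's filtered odds),
-- removing A's direction flag and backward index loop; same cost, different decomposition.

-- ===== PORT A =====
-- A iterates rows with a toggled `change` flag; the forward row loop appends odd elements,
-- the backward index loop `range(len-1,-1,-1)` is ported as a fold over the reversed row
-- (exact: it visits the same elements in the same order).
def cobrinha (matriz : List (List Int)) : List Int :=
  (matriz.foldl
    (fun (st : List Int × Bool) linha =>
      if st.2 = false then
        (linha.foldl (fun snake e => if PySem.Int.mod e 2 ≠ 0 then snake ++ [e] else snake) st.1,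
         true)
      else
        (linha.reverse.foldl (fun snake e => if PySem.Int.mod e 2 ≠ 0 then snake ++ [e] else snake) st.1,
         false))
    ([], false)).1

-- ===== PORT B =====
-- B: recursion consuming two rows per step; each row's odds are filtered first,
-- the second row's filtered odds are reversed, then recurse on the rest.
def cobrinha_alt : List (List Int) → List Int
  | [] => []
  | [ida] => ida.filter (fun e => decide (PySem.Int.mod e 2 ≠ 0))
  | ida :: volta :: rest =>
      ida.filter (fun e => decide (PySem.Int.mod e 2 ≠ 0))
        ++ (volta.filter (fun e => decide (PySem.Int.mod e 2 ≠ 0))).reverse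
        ++ cobrinha_alt rest

-- ===== PRECONDITION & SPEC =====
def Spec_cobrinha (matriz : List (List Int)) (out : List Int) : Prop := out = cobrinha_alt matriz
instance (matriz : List (List Int)) (out : List Int) : Decidable (Spec_cobrinha matriz out) := by unfold Spec_cobrinha; infer_instance

-- ===== CLAIM (what is proved, stated in full; the proofs are below) =====
def Claim_equal_cobrinha : Prop := ∀ (matriz : List (List Int)), Dom_cobrinha matriz → Spec_cobrinha matriz (cobrinha matriz)

-- ===== LEMMAS AND PROOFS =====

-- flag-indexed characterisation of A's fold, used only by the proof
def snakeAux : Bool → List (List Int) → List Int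
  | _, [] => []
  | false, r :: rs => r.filter (fun e => decide (PySem.Int.mod e 2 ≠ 0)) ++ snakeAux true rs
  | true, r :: rs => (r.filter (fun e => decide (PySem.Int.mod e 2 ≠ 0))).reverse ++ snakeAux false rs

lemma foldA_eq_snakeAux (rows : List (List Int)) (b : Bool) (acc : List Int) :
    (rows.foldl
      (fun (st : List Int × Bool) linha =>
        if st.2 = false then
          (linha.foldl (fun snake e => if PySem.Int.mod e 2 ≠ 0 then snake ++ [e] else snake) st.1,
           true)
        else
          (linha.reverse.foldl (fun snake e => if PySem.Int.mod e 2 ≠ 0 then snake ++ [e] else snake) st.1,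
           false))
      (acc, b)).1 = acc ++ snakeAux b rows := by
  induction rows generalizing b acc with
  | nil => simp [snakeAux]
  | cons r rs ih =>
    rw [List.foldl_cons]
    cases b with
    | false =>
      have hstep :
          (if (false : Bool) = false then
            (r.foldl (fun snake e => if PySem.Int.mod e 2 ≠ 0 then snake ++ [e] else snake) acc, true)
          else
            (r.reverse.foldl (fun snake e => if PySem.Int.mod e 2 ≠ 0 then snake ++ [e] else snake) acc, false))
            = (acc ++ r.filter (fun e => decide (PySem.Int.mod e 2 ≠ 0)), true) := by
        rw [if_pos rfl, PySem.List.foldl_append_ite_eq_filter]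
      rw [show ((acc, false) : List Int × Bool).2 = false from rfl] at *
      rw [hstep, ih, snakeAux, List.append_assoc]
    | true =>
      have hstep :
          (if (true : Bool) = false then
            (r.foldl (fun snake e => if PySem.Int.mod e 2 ≠ 0 then snake ++ [e] else snake) acc, true)
          else
            (r.reverse.foldl (fun snake e => if PySem.Int.mod e 2 ≠ 0 then snake ++ [e] else snake) acc, false))
            = (acc ++ (r.filter (fun e => decide (PySem.Int.mod e 2 ≠ 0))).reverse, false) := by
        rw [if_neg (by simp), PySem.List.foldl_append_ite_eq_filter, List.filter_reverse]
      rw [show ((acc, true) : List Int × Bool).2 = true from rfl] at *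
      rw [hstep, ih, snakeAux, List.append_assoc]

lemma snakeAux_false_eq_alt (rows : List (List Int)) :
    snakeAux false rows = cobrinha_alt rows := by
  induction rows using cobrinha_alt.induct with
  | case1 => simp [snakeAux, cobrinha_alt]
  | case2 ida => simp [snakeAux, cobrinha_alt]
  | case3 ida volta rest ih =>
    simp [snakeAux, cobrinha_alt, ih]

-- ===== VERDICT (by name: the statement is the Claim_ definition above) =====
theorem cobrinha_spec : Claim_equal_cobrinha := by
  intro matriz _
  show cobrinha matriz = cobrinha_alt matriz
  unfold cobrinha
  rw [foldA_eq_snakeAux, snakeAux_false_eq_alt, List.nil_append]
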